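-- pv_equiv track=rewrite | github.com/JamesZwq/nclique | pivoter/proj1/autotest_out_q2/5573658_q2_autotest.py | sort_by_degree
-- ===== SOURCE A (Python) =====
-- def sort_by_degree(edge_list):  # O(n)
--     """initialises the data required for assign_core_numbers, which is the flat array
--     implementation of the core decomposition algorithm"""
--     n = len(edge_list)
--     degrees = [0] * n
--     bins = [[] for _ in range(n)]  # nodes can have 0 to n-1 edges
--     max_bin = 0
--     for node in range(n):  # O(n)
--         deg = len(edge_list[node])  # O(1)
--         if deg > max_bin:
--             max_bin = deg
--         degrees[node] = deg
--         bins[deg].append(node)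
--
--     bin_positions = [0] * (max_bin + 1)
--     order = [-1] * n
--     node_positions = [-1] * n
--     pos = 0
--     # both outer and inner loops below are bounded by O(n) for each loop
--     # but total number of nodes in bins is n so total is 2n-1
--     for deg, nodes in enumerate(bins):  # O(n)
--         if deg > max_bin:
--             break
--         bin_positions[deg] = pos
--         for j, node in enumerate(nodes):  # O(n)
--             order[pos] = node
--             node_positions[node] = pos
--             pos += 1
--
--     return order, degrees, bin_positions, node_positions
-- ===== SOURCE B (Python) =====
-- def sort_by_degree(edge_list):
--     """Bucket the nodes by degree with per-degree comprehensions instead of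
--     mutating bin arrays; simpler, same results. Degrees run from 0 to n-1,
--     so there is one (possibly empty) bucket per possible degree."""
--     n = len(edge_list)
--     degrees = [len(adj) for adj in edge_list]
--     max_bin = max(degrees, default=0)
--     buckets = [[v for v, dv in enumerate(degrees) if dv == d] for d in range(n)]
--     order = [v for bucket in buckets for v in bucket]
--     bin_positions = [sum(len(bucket) for bucket in buckets[:d])
--                      for d in range(max_bin + 1)]
--     node_positions = [order.index(v) for v in range(n)]
--     return order, degrees, bin_positions, node_positions
-- ===== Notes on version B (the rewrite author's own statement) =====
-- stated objective: simpler
-- what changed: B replaces A's mutable bucket-array bookkeeping (append into bins, then a position-counter sweep writing three preallocated arrays in place) by per-degree filter comprehensions, a flatten, prefix sums over bucket lengths, and list.index for node positions.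
import Mathlib
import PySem

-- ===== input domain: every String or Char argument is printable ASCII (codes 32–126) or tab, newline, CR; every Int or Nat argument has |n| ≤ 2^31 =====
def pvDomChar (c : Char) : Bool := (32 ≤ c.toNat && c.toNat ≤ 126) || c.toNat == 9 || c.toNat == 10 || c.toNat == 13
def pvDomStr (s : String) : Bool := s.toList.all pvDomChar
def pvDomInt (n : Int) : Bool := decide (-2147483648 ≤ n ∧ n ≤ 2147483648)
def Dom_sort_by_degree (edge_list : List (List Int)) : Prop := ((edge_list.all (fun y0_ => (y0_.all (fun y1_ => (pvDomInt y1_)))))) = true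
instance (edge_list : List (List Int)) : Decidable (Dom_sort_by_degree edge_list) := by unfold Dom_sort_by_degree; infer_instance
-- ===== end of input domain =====

-- B replaces A's mutable bucket arrays by per-degree comprehensions (one filter per possible
-- degree 0..n-1, flatten, prefix sums and list.index) — objective: simpler. Same return values on Pre_.

-- ===== PORT A =====
-- first loop of A: build degrees, bins (bucket lists of node indices) and the running max
def sbd_phase1 (edge_list : List (List Int)) : List Int × List (List Nat) × Nat :=
  (List.range edge_list.length).foldl
    (fun st node =>
      let deg := (edge_list.getD node []).length
      let max_bin := if deg > st.2.2 then deg else st.2.2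
      (st.1.set node (deg : Int), st.2.1.modify deg (fun b => b ++ [node]), max_bin))
    (List.replicate edge_list.length 0, List.replicate edge_list.length [], 0)

-- inner loop of A's second phase: place each node of one bin at consecutive positions
def sbd_inner (nodes : List Nat) (st : List Int × List Int × Nat) : List Int × List Int × Nat :=
  nodes.foldl
    (fun st node => (st.1.set st.2.2 (Int.ofNat node), st.2.1.set node (Int.ofNat st.2.2), st.2.2 + 1))
    st

-- outer loop of A's second phase, with the `break` once deg > max_bin
def sbd_outer (max_bin : Nat) : Nat → List (List Nat) →
    (List Int × List Int × List Int × Nat) → List Int × List Int × List Int × Nat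
  | _, [], st => st
  | deg, nodes :: rest, (bp, ord, np, pos) =>
    if deg > max_bin then (bp, ord, np, pos)
    else
      let bp' := bp.set deg (pos : Int)
      let st' := sbd_inner nodes (ord, np, pos)
      sbd_outer max_bin (deg + 1) rest (bp', st'.1, st'.2.1, st'.2.2)

def sort_by_degree (edge_list : List (List Int)) : List Int × List Int × List Int × List Int :=
  let n := edge_list.length
  let p1 := sbd_phase1 edge_list
  let degrees := p1.1
  let bins := p1.2.1
  let max_bin := p1.2.2
  let r := sbd_outer max_bin 0 bins
    (List.replicate (max_bin + 1) 0, List.replicate n (-1), List.replicate n (-1), 0)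
  (r.2.1, degrees, r.1, r.2.2.1)

-- ===== PORT B =====
def sort_by_degree_alt (edge_list : List (List Int)) : List Int × List Int × List Int × List Int :=
  let n := edge_list.length
  let degrees : List Int := edge_list.map (fun adj => (adj.length : Int))
  let max_bin : Int := (PySem.List.max? degrees (fun x => x)).getD 0
  let buckets : List (List Int) :=
    (PySem.List.pyRange 0 (n : Int) 1).map
      (fun d => (PySem.List.enumerate degrees 0).filterMap
        (fun p => if p.2 = d then some p.1 else none))
  let order : List Int := buckets.flatten
  let bin_positions : List Int :=
    (PySem.List.pyRange 0 (max_bin + 1) 1).map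
      (fun d => ((PySem.List.slice buckets none (some d)).map (fun b => (b.length : Int))).sum)
  let node_positions : List Int :=
    (PySem.List.pyRange 0 (n : Int) 1).map
      (fun v => ((PySem.List.index? order v).getD 0 : Int))
  (order, degrees, bin_positions, node_positions)

-- ===== PRECONDITION & SPEC =====
-- Pre_ excludes exactly the inputs where A raises IndexError: some node's degree is ≥ n,
-- so A's `bins[deg].append(node)` is out of range (B also raises there, a ValueError).
def Pre_sort_by_degree (edge_list : List (List Int)) : Prop :=
  ∀ adj ∈ edge_list, adj.length < edge_list.length
instance (edge_list : List (List Int)) : Decidable (Pre_sort_by_degree edge_list) := by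
  unfold Pre_sort_by_degree; infer_instance
def pvWitness_sort_by_degree : List (List Int) := [[7], []]

def Spec_sort_by_degree (edge_list : List (List Int)) (out : List Int × List Int × List Int × List Int) : Prop := out = sort_by_degree_alt edge_list
instance (edge_list : List (List Int)) (out : List Int × List Int × List Int × List Int) : Decidable (Spec_sort_by_degree edge_list out) := by unfold Spec_sort_by_degree; infer_instance

-- ===== CLAIM (what is proved, stated in full; the proofs are below) =====
def Claim_equal_sort_by_degree : Prop := ∀ (edge_list : List (List Int)), Dom_sort_by_degree edge_list → Pre_sort_by_degree edge_list → Spec_sort_by_degree edge_list (sort_by_degree edge_list)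

-- ===== LEMMAS AND PROOFS =====

-- degree sequence, buckets and their concatenation (proof-side vocabulary)
def dSeq (el : List (List Int)) : List Nat := el.map List.length
def bkt (el : List (List Int)) (d : Nat) : List Nat :=
  (List.range el.length).filter (fun i => (dSeq el).getD i 0 = d)
def flatN (el : List (List Int)) (d : Nat) : List Nat :=
  ((List.range d).map (bkt el)).flatten
def rnk (el : List (List Int)) (w : Nat) : Nat :=
  (List.range w).countP (fun i => (dSeq el).getD i 0 = (dSeq el).getD w 0)
def posOf (el : List (List Int)) (w : Nat) : Nat :=
  (flatN el ((dSeq el).getD w 0)).length + rnk el w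
def mdeg (el : List (List Int)) : Nat := (dSeq el).foldl max 0

-- generic list lemmas
theorem replicate_eq_map_range {α : Type} (n : Nat) (v : α) :
    List.replicate n v = (List.range n).map (fun _ => v) := by
  simp [List.map_const']

theorem map_range_set {α : Type} (f : Nat → α) (n k : Nat) (v : α) :
    ((List.range n).map f).set k v = (List.range n).map (fun i => if i = k then v else f i) := by
  apply List.ext_getElem
  · simp
  · intro i hi _
    simp only [List.getElem_set, List.getElem_map, List.getElem_range]
    simp at hi
    by_cases h : i = k
    · simp [h]
    · simp only [if_neg h, if_neg (fun h' : k = i => h h'.symm)]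

theorem map_range_modify {α : Type} (f : Nat → α) (n k : Nat) (g : α → α) :
    ((List.range n).map f).modify k g
      = (List.range n).map (fun i => if i = k then g (f i) else f i) := by
  apply List.ext_getElem
  · simp
  · intro i hi _
    simp at hi
    rw [List.getElem_modify]
    simp only [List.getElem_map, List.getElem_range]
    by_cases h : i = k
    · simp [h]
    · simp only [if_neg h, if_neg (fun h' : k = i => h h'.symm)]

theorem map_range_getD {α : Type} (l : List α) (d : α) :
    (List.range l.length).map (fun i => l.getD i d) = l := by
  apply List.ext_getElem
  · simp
  · intro i hi _
    simp at hi
    simp [List.getD_eq_getElem?_getD, List.getElem?_eq_getElem hi]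

theorem castfold_max (l : List Nat) (a : Nat) :
    (l.map (fun k : Nat => (k : Int))).foldl max ((a : Nat) : Int) = ((l.foldl max a : Nat) : Int) := by
  induction l generalizing a with
  | nil => rfl
  | cons x t ih =>
    rw [List.map_cons, List.foldl_cons, List.foldl_cons, ← Nat.cast_max, ih]

theorem filterMap_if_eq_filter_map {α β : Type} (l : List α) (p : α → Bool) (f : α → β) :
    l.filterMap (fun x => if p x then some (f x) else none) = (l.filter p).map f := by
  induction l with
  | nil => rfl
  | cons x t ih =>
    by_cases h : p x <;> simp [List.filter_cons, h, ih]

theorem index?_map_natCast (l : List Nat) (v : Nat) :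
    PySem.List.index? (l.map (fun k : Nat => (k : Int))) (v : Int) = PySem.List.index? l v := by
  induction l with
  | nil => rfl
  | cons x t ih =>
    by_cases h : x = v
    · subst h
      rw [show (List.map (fun k : Nat => (k : Int)) (x :: t)) = (x : Int) :: List.map (fun k : Nat => (k : Int)) t from rfl,
        PySem.List.index?_cons_self, PySem.List.index?_cons_self]
    · rw [show (List.map (fun k : Nat => (k : Int)) (x :: t)) = (x : Int) :: List.map (fun k : Nat => (k : Int)) t from rfl,
        PySem.List.index?_cons_of_ne _ (by exact_mod_cast h),
        PySem.List.index?_cons_of_ne _ h, ih]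

theorem index?_append_of_not_mem {α : Type} [BEq α] [LawfulBEq α] (l t : List α) (v : α)
    (h : v ∉ l) :
    PySem.List.index? (l ++ t) v = (PySem.List.index? t v).map (· + l.length) := by
  induction l with
  | nil => simp
  | cons x r ih =>
    have hx : x ≠ v := fun he => h (he ▸ List.mem_cons_self)
    have hr : v ∉ r := fun hm => h (List.mem_cons_of_mem _ hm)
    rw [List.cons_append, PySem.List.index?_cons_of_ne _ hx, ih hr, Option.map_map]
    cases PySem.List.index? t v <;> simp

theorem countP_nat_lt_succ (l : List Nat) (k : Nat) :
    l.countP (fun x => decide (x < k + 1))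
      = l.countP (fun x => decide (x < k)) + l.countP (fun x => decide (x = k)) := by
  induction l with
  | nil => rfl
  | cons x t ih =>
    simp only [List.countP_cons, ih]
    by_cases h2 : x = k
    · subst h2
      simp
      omega
    · have h3 : (x < k + 1) ↔ (x < k) := by omega
      by_cases h1 : x < k <;> simp [h1, h2, h3] <;> omega

-- counting facts about buckets
theorem flatN_succ (el : List (List Int)) (d : Nat) :
    flatN el (d + 1) = flatN el d ++ bkt el d := by
  unfold flatN
  rw [List.range_succ, List.map_append, List.flatten_append]
  simp

theorem length_flatN (el : List (List Int)) (d : Nat) :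
    (flatN el d).length = (List.range el.length).countP (fun i => decide ((dSeq el).getD i 0 < d)) := by
  induction d with
  | zero => simp [flatN]
  | succ d ih =>
    rw [flatN_succ, List.length_append, ih]
    have h1 : (List.range el.length).countP (fun i => decide ((dSeq el).getD i 0 < d + 1))
        = ((List.range el.length).map (fun i => (dSeq el).getD i 0)).countP (fun x => decide (x < d + 1)) := by
      rw [List.countP_map]; rfl
    have h2 : (List.range el.length).countP (fun i => decide ((dSeq el).getD i 0 < d))
        = ((List.range el.length).map (fun i => (dSeq el).getD i 0)).countP (fun x => decide (x < d)) := by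
      rw [List.countP_map]; rfl
    have h3 : (bkt el d).length
        = ((List.range el.length).map (fun i => (dSeq el).getD i 0)).countP (fun x => decide (x = d)) := by
      rw [List.countP_map, bkt, ← List.countP_eq_length_filter]; rfl
    rw [h1, h2, h3, countP_nat_lt_succ]

theorem length_flatN_le (el : List (List Int)) (d : Nat) :
    (flatN el d).length ≤ el.length := by
  rw [length_flatN]
  calc (List.range el.length).countP _ ≤ (List.range el.length).length := List.countP_le_length
    _ = el.length := List.length_range


theorem deg_le_mdeg (el : List (List Int)) (i : Nat) (hi : i < el.length) :
    (dSeq el).getD i 0 ≤ mdeg el := by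
  have hi' : i < (dSeq el).length := by simpa [dSeq] using hi
  have hmem : (dSeq el).getD i 0 ∈ dSeq el := by
    rw [List.getD_eq_getElem?_getD, List.getElem?_eq_getElem hi']
    exact List.getElem_mem hi'
  exact ((PySem.List.le_foldl_max (dSeq el) 0).2) _ hmem

theorem length_flatN_full (el : List (List Int)) :
    (flatN el (mdeg el + 1)).length = el.length := by
  rw [length_flatN]
  have : ∀ i ∈ List.range el.length, decide ((dSeq el).getD i 0 < mdeg el + 1) = true := by
    intro i hi
    simp only [decide_eq_true_eq]
    have := deg_le_mdeg el i (List.mem_range.mp hi)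
    omega
  rw [List.countP_eq_length.mpr this, List.length_range]

theorem range_split (a n : Nat) (h : a ≤ n) :
    List.range n = List.range a ++ List.range' a (n - a) := by
  rw [List.range_eq_range', List.range_eq_range']
  have h2 : List.range' 0 a 1 ++ List.range' (0 + 1 * a) (n - a) 1 = List.range' 0 (a + (n - a)) 1 :=
    List.range'_append
  simp only [Nat.zero_add, Nat.one_mul] at h2
  rw [show n = a + (n - a) by omega, ← h2]
  have h3 : a + (n - a) - a = n - a := by omega
  rw [h3]

-- under Pre_, the maximum degree is < n (so buckets of degree > mdeg are all empty)
theorem mdeg_lt (el : List (List Int)) (hel : el ≠ []) (hPre : Pre_sort_by_degree el) :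
    mdeg el < el.length := by
  have hn : 0 < el.length := List.length_pos_of_ne_nil hel
  rcases PySem.List.foldl_max_mem (dSeq el) 0 with h | h
  · unfold mdeg; omega
  · obtain ⟨adj, hadj, hlen⟩ := List.mem_map.mp h
    have := hPre adj hadj
    unfold mdeg; omega

theorem bkt_empty (el : List (List Int)) (e : Nat) (h : mdeg el < e) : bkt el e = [] := by
  unfold bkt
  rw [List.filter_eq_nil_iff]
  intro i hi
  simp only [decide_eq_true_eq]
  intro hc
  have := deg_le_mdeg el i (List.mem_range.mp hi)
  omega

theorem flatN_stable (el : List (List Int)) (m : Nat) (h : mdeg el + 1 ≤ m) :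
    flatN el m = flatN el (mdeg el + 1) := by
  unfold flatN
  rw [range_split (mdeg el + 1) m h, List.map_append, List.flatten_append]
  have : (((List.range' (mdeg el + 1) (m - (mdeg el + 1))).map (bkt el))).flatten = [] := by
    rw [List.flatten_eq_nil_iff]
    intro l hl
    obtain ⟨e, he, rfl⟩ := List.mem_map.mp hl
    have := List.mem_range'_1.mp he
    exact bkt_empty el e (by omega)
  rw [this, List.append_nil]

-- splitting the bucket of w at w itself
theorem bkt_split (el : List (List Int)) (w : Nat) (hw : w < el.length) :
    bkt el ((dSeq el).getD w 0)
      = (List.range w).filter (fun i => (dSeq el).getD i 0 = (dSeq el).getD w 0)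
        ++ (w :: (List.range' (w + 1) (el.length - w - 1)).filter
              (fun i => (dSeq el).getD i 0 = (dSeq el).getD w 0)) := by
  unfold bkt
  rw [range_split w el.length (Nat.le_of_lt hw), List.filter_append]
  congr 1
  rw [show el.length - w = (el.length - w - 1) + 1 by omega, List.range'_succ, List.filter_cons]
  simp

theorem notMem_filter_range_self (w : Nat) (p : Nat → Bool) :
    w ∉ (List.range w).filter p := by
  intro h
  have := List.mem_range.mp (List.mem_of_mem_filter h)
  omega

theorem length_filter_range_rnk (el : List (List Int)) (w : Nat) :
    ((List.range w).filter (fun i => (dSeq el).getD i 0 = (dSeq el).getD w 0)).length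
      = rnk el w := by
  rw [← List.countP_eq_length_filter]; rfl

theorem mem_bkt_self (el : List (List Int)) (w : Nat) (hw : w < el.length) :
    w ∈ bkt el ((dSeq el).getD w 0) := by
  unfold bkt
  exact List.mem_filter.mpr ⟨List.mem_range.mpr hw, by simp⟩

theorem notMem_flatN_self (el : List (List Int)) (w : Nat) :
    w ∉ flatN el ((dSeq el).getD w 0) := by
  intro h
  obtain ⟨l, hl, hwl⟩ := List.mem_flatten.mp h
  obtain ⟨d, hd, rfl⟩ := List.mem_map.mp hl
  have hd' := List.mem_range.mp hd
  have := (List.mem_filter.mp hwl).2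
  simp only [decide_eq_true_eq] at this
  omega

theorem idxOf_bkt (el : List (List Int)) (w : Nat) (hw : w < el.length) :
    List.idxOf w (bkt el ((dSeq el).getD w 0)) = rnk el w := by
  rw [bkt_split el w hw, List.idxOf_append,
    if_neg (notMem_filter_range_self w _), List.idxOf_cons_self,
    length_filter_range_rnk el w]
  exact Nat.zero_add _

theorem index?_bkt (el : List (List Int)) (w : Nat) (hw : w < el.length) :
    PySem.List.index? (bkt el ((dSeq el).getD w 0)) w = some (rnk el w) := by
  rw [bkt_split el w hw,
    index?_append_of_not_mem _ _ _ (notMem_filter_range_self w _),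
    PySem.List.index?_cons_self]
  show some (0 + ((List.range w).filter
      (fun i => (dSeq el).getD i 0 = (dSeq el).getD w 0)).length) = some (rnk el w)
  rw [Nat.zero_add, length_filter_range_rnk el w]

-- index of w inside the full concatenation
theorem index?_flatN_full (el : List (List Int)) (w : Nat) (hw : w < el.length) :
    PySem.List.index? (flatN el (mdeg el + 1)) w = some (posOf el w) := by
  have hdle : (dSeq el).getD w 0 ≤ mdeg el := deg_le_mdeg el w hw
  have hsplit : flatN el (mdeg el + 1)
      = flatN el ((dSeq el).getD w 0)
        ++ (bkt el ((dSeq el).getD w 0)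
            ++ ((List.range' ((dSeq el).getD w 0 + 1) (mdeg el - (dSeq el).getD w 0)).map (bkt el)).flatten) := by
    unfold flatN
    rw [range_split ((dSeq el).getD w 0) (mdeg el + 1) (by omega), List.map_append, List.flatten_append,
      show mdeg el + 1 - (dSeq el).getD w 0 = (mdeg el - (dSeq el).getD w 0) + 1 by omega,
      List.range'_succ, List.map_cons, List.flatten_cons]
  rw [hsplit, index?_append_of_not_mem _ _ _ (notMem_flatN_self el w),
    PySem.List.index?_append_of_mem _ (mem_bkt_self el w hw), index?_bkt el w hw]
  simp [posOf, Nat.add_comm]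

-- ===== phase 1 =====
theorem phase1_spec (el : List (List Int)) :
    sbd_phase1 el
      = ((dSeq el).map (fun k : Nat => (k : Int)),
         (List.range el.length).map (bkt el),
         mdeg el) := by
  have hlen : (dSeq el).length = el.length := by simp [dSeq]
  have hdg : ∀ k, (el.getD k []).length = (dSeq el).getD k 0 := by
    intro k
    exact (List.getD_map el ([] : List Int) List.length).symm
  have key : ∀ k, k ≤ el.length →
      (List.range k).foldl
        (fun st node =>
          let deg := (el.getD node []).length
          let max_bin := if deg > st.2.2 then deg else st.2.2
          (st.1.set node (deg : Int), st.2.1.modify deg (fun b => b ++ [node]), max_bin))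
        (List.replicate el.length 0, List.replicate el.length [], 0)
      = ((List.range el.length).map
           (fun i => if i < k then ((((dSeq el).getD i 0) : Nat) : Int) else 0),
         (List.range el.length).map
           (fun d => (List.range k).filter (fun i => (dSeq el).getD i 0 = d)),
         ((dSeq el).take k).foldl max 0) := by
    intro k
    induction k with
    | zero =>
      intro _
      rw [replicate_eq_map_range, replicate_eq_map_range]
      simp
    | succ k ih =>
      intro hk1
      have hkn : k < el.length := hk1
      have hkd : k < (dSeq el).length := by omega
      rw [List.range_succ, List.foldl_append, ih (Nat.le_of_lt hkn), List.foldl_cons,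
        List.foldl_nil]
      dsimp only
      rw [hdg k, map_range_set, map_range_modify]
      have e1 : (List.range el.length).map
            (fun i => if i = k then (((dSeq el).getD k 0 : Nat) : Int)
              else if i < k then ((((dSeq el).getD i 0) : Nat) : Int) else 0)
          = (List.range el.length).map
            (fun i => if i < k + 1 then ((((dSeq el).getD i 0) : Nat) : Int) else 0) := by
        apply List.map_congr_left
        intro i _
        by_cases h : i = k
        · subst h; simp
        · rw [if_neg h]
          by_cases h2 : i < k
          · rw [if_pos h2, if_pos (by omega)]
          · rw [if_neg h2, if_neg (by omega)]
      have e2 : (List.range el.length).map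
            (fun d => if d = (dSeq el).getD k 0
              then (List.range k).filter (fun i => (dSeq el).getD i 0 = d) ++ [k]
              else (List.range k).filter (fun i => (dSeq el).getD i 0 = d))
          = (List.range el.length).map
            (fun d => (List.range (k + 1)).filter (fun i => (dSeq el).getD i 0 = d)) := by
        apply List.map_congr_left
        intro d _
        rw [List.range_succ, List.filter_append]
        by_cases h : d = (dSeq el).getD k 0
        · rw [if_pos h]
          have : (List.filter (fun i => decide ((dSeq el).getD i 0 = d)) [k]) = [k] := by
            simp [h]
          rw [this]
        · rw [if_neg h]
          have : (List.filter (fun i => decide ((dSeq el).getD i 0 = d)) [k]) = [] := by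
            simp; intro hc; exact absurd hc.symm h
          rw [this, List.append_nil]
      have e3 : (if (dSeq el).getD k 0 > ((dSeq el).take k).foldl max 0
              then (dSeq el).getD k 0 else ((dSeq el).take k).foldl max 0)
          = ((dSeq el).take (k + 1)).foldl max 0 := by
        rw [List.take_add_one, List.getElem?_eq_getElem hkd]
        have hgd : (dSeq el).getD k 0 = (dSeq el)[k] := by
          rw [List.getD_eq_getElem?_getD, List.getElem?_eq_getElem hkd]; rfl
        simp only [Option.toList_some]
        rw [List.foldl_append, List.foldl_cons, List.foldl_nil, ← hgd]
        rcases Nat.lt_or_ge (((dSeq el).take k).foldl max 0) ((dSeq el).getD k 0) with h | h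
        · rw [if_pos h, Nat.max_eq_right (Nat.le_of_lt h)]
        · rw [if_neg (by omega), Nat.max_eq_left h]
      rw [e1, e2, e3, List.range_succ]
  unfold sbd_phase1
  rw [key el.length (Nat.le_refl _)]
  have f1 : (List.range el.length).map
        (fun i => if i < el.length then ((((dSeq el).getD i 0) : Nat) : Int) else 0)
      = (dSeq el).map (fun k : Nat => (k : Int)) := by
    have := map_range_getD (dSeq el) 0
    calc (List.range el.length).map
          (fun i => if i < el.length then ((((dSeq el).getD i 0) : Nat) : Int) else 0)
        = (List.range el.length).map (fun i => ((((dSeq el).getD i 0) : Nat) : Int)) := by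
          apply List.map_congr_left
          intro i hi
          rw [if_pos (List.mem_range.mp hi)]
      _ = ((List.range (dSeq el).length).map (fun i => (dSeq el).getD i 0)).map
            (fun k : Nat => (k : Int)) := by rw [List.map_map, hlen]; rfl
      _ = (dSeq el).map (fun k : Nat => (k : Int)) := by rw [this]
  rw [f1]
  have f3 : (dSeq el).take el.length = dSeq el := by
    rw [← hlen]; exact List.take_length ..
  rw [f3]
  rfl

-- ===== phase 2 =====
-- state after processing all degrees < d
def bpF (el : List (List Int)) (d : Nat) : List Int :=
  (List.range (mdeg el + 1)).map (fun e => if e < d then ((flatN el e).length : Int) else 0)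
def ordF (el : List (List Int)) (d : Nat) : List Int :=
  (flatN el d).map (fun k : Nat => (k : Int))
    ++ List.replicate (el.length - (flatN el d).length) (-1)
def npF (el : List (List Int)) (d : Nat) : List Int :=
  (List.range el.length).map
    (fun w => if (dSeq el).getD w 0 < d then (posOf el w : Int) else -1)

theorem inner_spec (n : Nat) (nodes : List Nat) :
    ∀ (A : List Nat) (g : Nat → Int), nodes.Nodup → (∀ v ∈ nodes, v < n) →
      A.length + nodes.length ≤ n →
      sbd_inner nodes
        (A.map (fun k : Nat => (k : Int)) ++ List.replicate (n - A.length) (-1),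
         (List.range n).map g, A.length)
      = ((A ++ nodes).map (fun k : Nat => (k : Int))
           ++ List.replicate (n - (A.length + nodes.length)) (-1),
         (List.range n).map
           (fun w => if w ∈ nodes then ((A.length + nodes.idxOf w : Nat) : Int) else g w),
         A.length + nodes.length) := by
  induction nodes with
  | nil => intro A g _ _ _; simp [sbd_inner]
  | cons v rest ih =>
    intro A g hnd hlt hle
    have hvn : v < n := hlt v List.mem_cons_self
    have hAn : A.length < n := by simp at hle; omega
    have hset1 : (A.map (fun k : Nat => (k : Int)) ++ List.replicate (n - A.length) (-1)).set A.length (Int.ofNat v)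
        = (A ++ [v]).map (fun k : Nat => (k : Int)) ++ List.replicate (n - (A.length + 1)) (-1) := by
      have hrep : List.replicate (n - A.length) (-1 : Int)
          = (-1 : Int) :: List.replicate (n - (A.length + 1)) (-1) := by
        have : n - A.length = (n - (A.length + 1)) + 1 := by omega
        rw [this, List.replicate_succ]
      rw [hrep, List.set_append_right _ _ (by simp)]
      simp
    have hset2 : (((List.range n).map g).set v (Int.ofNat A.length))
        = (List.range n).map (fun w => if w = v then (Int.ofNat A.length) else g w) :=
      map_range_set g n v _
    have hstep : sbd_inner (v :: rest)
        (A.map (fun k : Nat => (k : Int)) ++ List.replicate (n - A.length) (-1),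
         (List.range n).map g, A.length)
        = sbd_inner rest
          ((A ++ [v]).map (fun k : Nat => (k : Int)) ++ List.replicate (n - (A.length + 1)) (-1),
           (List.range n).map (fun w => if w = v then (Int.ofNat A.length) else g w),
           A.length + 1) := by
      unfold sbd_inner
      rw [List.foldl_cons]
      dsimp only
      rw [hset1, hset2]
    rw [hstep]
    have hih := ih (A ++ [v]) (fun w => if w = v then (Int.ofNat A.length) else g w)
      (List.nodup_cons.mp hnd).2
      (fun x hx => hlt x (List.mem_cons_of_mem _ hx))
      (by simp at hle ⊢; omega)
    simp only [List.length_append, List.length_cons, List.length_nil] at hih ⊢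
    rw [show A.length + 1 = A.length + 1 + 0 from rfl] at hih
    simp only [Nat.add_zero] at hih
    rw [hih, List.append_assoc]
    have hv_rest : v ∉ rest := (List.nodup_cons.mp hnd).1
    simp only [Prod.mk.injEq]
    refine ⟨?_, ?_, by omega⟩
    · have h1 : A ++ ([v] ++ rest) = A ++ v :: rest := rfl
      have h2 : A.length + 1 + rest.length = A.length + (rest.length + 1) := by omega
      rw [h1, h2]
    apply List.map_congr_left
    intro w _
    by_cases hw : w = v
    · subst hw
      simp [hv_rest, List.idxOf_cons_self]
    · by_cases hwr : w ∈ rest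
      · have : List.idxOf w (v :: rest) = List.idxOf w rest + 1 := List.idxOf_cons_ne _ (fun h => hw h.symm)
        rw [if_pos hwr, if_pos (List.mem_cons_of_mem _ hwr), this]
        push_cast
        ring
      · have hnm : w ∉ v :: rest := by simp [hw, hwr]
        simp [hwr, hnm, hw]

theorem outer_stop (m : Nat) (d : Nat) (L : List (List Nat)) (st : List Int × List Int × List Int × Nat)
    (h : m < d) : sbd_outer m d L st = st := by
  cases L with
  | nil => rfl
  | cons nodes rest =>
    obtain ⟨bp, ord, np, pos⟩ := st
    rw [sbd_outer, if_pos h]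

theorem outer_append (m : Nat) (L1 L2 : List (List Nat)) :
    ∀ (d : Nat) (st : List Int × List Int × List Int × Nat), d + L1.length ≤ m + 1 →
      sbd_outer m d (L1 ++ L2) st = sbd_outer m (d + L1.length) L2 (sbd_outer m d L1 st) := by
  induction L1 with
  | nil => intro d st _; simp [sbd_outer]
  | cons nodes rest ih =>
    intro d st hle
    obtain ⟨bp, ord, np, pos⟩ := st
    have hd : ¬ (d > m) := by simp at hle ⊢; omega
    rw [List.cons_append, sbd_outer, sbd_outer, if_neg hd, if_neg hd]
    simp only [List.length_cons]
    rw [ih (d + 1) _ (by simp at hle; omega)]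
    ring_nf

theorem outer_spec (el : List (List Int)) (k : Nat) :
    ∀ d, d + k = mdeg el + 1 →
      sbd_outer (mdeg el) d ((List.range' d k).map (bkt el))
        (bpF el d, ordF el d, npF el d, (flatN el d).length)
      = (bpF el (mdeg el + 1), ordF el (mdeg el + 1), npF el (mdeg el + 1),
         (flatN el (mdeg el + 1)).length) := by
  induction k with
  | zero =>
    intro d hd
    have hd' : d = mdeg el + 1 := by omega
    subst hd'
    rfl
  | succ k ih =>
    intro d hd
    have hdM : d ≤ mdeg el := by omega
    rw [List.range'_succ, List.map_cons]
    simp only [sbd_outer]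
    rw [if_neg (by omega : ¬ d > mdeg el)]
    have hnodes_nodup : (bkt el d).Nodup := (List.nodup_range).filter _
    have hnodes_lt : ∀ v ∈ bkt el d, v < el.length := fun v hv =>
      List.mem_range.mp (List.mem_of_mem_filter hv)
    have hlen1 : (flatN el d).length + (bkt el d).length ≤ el.length := by
      have h := length_flatN_le el (d + 1)
      rw [flatN_succ, List.length_append] at h
      exact h
    have hinner := inner_spec el.length (bkt el d) (flatN el d)
      (fun w => if (dSeq el).getD w 0 < d then ((posOf el w : Nat) : Int) else -1)
      hnodes_nodup hnodes_lt hlen1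
    have hstate : (ordF el d, npF el d, (flatN el d).length)
        = (((flatN el d).map (fun k : Nat => (k : Int))
              ++ List.replicate (el.length - (flatN el d).length) (-1)),
           (List.range el.length).map
             (fun w => if (dSeq el).getD w 0 < d then ((posOf el w : Nat) : Int) else -1),
           (flatN el d).length) := rfl
    rw [hstate, hinner]
    dsimp only
    have hbp : (bpF el d).set d (((flatN el d).length : Int)) = bpF el (d + 1) := by
      unfold bpF
      rw [map_range_set]
      apply List.map_congr_left
      intro e _
      by_cases h : e = d
      · subst h
        rw [if_pos rfl, if_pos (by omega)]
      · rw [if_neg h]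
        by_cases h2 : e < d
        · rw [if_pos h2, if_pos (by omega)]
        · rw [if_neg h2, if_neg (by omega)]
    have hord : (flatN el d ++ bkt el d).map (fun k : Nat => (k : Int))
          ++ List.replicate (el.length - ((flatN el d).length + (bkt el d).length)) (-1)
        = ordF el (d + 1) := by
      unfold ordF
      rw [flatN_succ, List.length_append]
    have hnp : (List.range el.length).map
          (fun w => if w ∈ bkt el d
            then (((flatN el d).length + (bkt el d).idxOf w : Nat) : Int)
            else if (dSeq el).getD w 0 < d then ((posOf el w : Nat) : Int) else -1)
        = npF el (d + 1) := by
      unfold npF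
      apply List.map_congr_left
      intro w hw
      have hwn : w < el.length := List.mem_range.mp hw
      by_cases hmem : w ∈ bkt el d
      · have hdw : (dSeq el).getD w 0 = d := by
          have h := (List.mem_filter.mp hmem).2
          simpa using h
        rw [if_pos hmem, if_pos (by omega)]
        subst hdw
        rw [idxOf_bkt el w hwn]
        rfl
      · rw [if_neg hmem]
        have hne : (dSeq el).getD w 0 ≠ d := by
          intro h
          exact hmem (h ▸ mem_bkt_self el w hwn)
        by_cases h2 : (dSeq el).getD w 0 < d
        · rw [if_pos h2, if_pos (by omega)]
        · rw [if_neg h2, if_neg (by omega)]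
    have hpos : (flatN el d).length + (bkt el d).length = (flatN el (d + 1)).length := by
      rw [flatN_succ, List.length_append]
    rw [hbp, hord, hnp, hpos]
    exact ih (d + 1) (by omega)

-- ===== the two sides =====
theorem sideA (el : List (List Int)) (hel : el ≠ []) (hPre : Pre_sort_by_degree el) :
    sort_by_degree el
      = (ordF el (mdeg el + 1), (dSeq el).map (fun k : Nat => (k : Int)),
         bpF el (mdeg el + 1), npF el (mdeg el + 1)) := by
  have hMn : mdeg el < el.length := mdeg_lt el hel hPre
  unfold sort_by_degree
  rw [phase1_spec el]
  dsimp only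
  have hsplit : (List.range el.length).map (bkt el)
      = (List.range' 0 (mdeg el + 1)).map (bkt el)
        ++ (List.range' (mdeg el + 1) (el.length - (mdeg el + 1))).map (bkt el) := by
    rw [← List.map_append]
    have h1 := range_split (mdeg el + 1) el.length (by omega)
    simp only [List.range_eq_range'] at h1
    rw [List.range_eq_range', ← h1]
  have hlen1 : ((List.range' 0 (mdeg el + 1)).map (bkt el)).length = mdeg el + 1 := by
    simp
  have hinit : (List.replicate (mdeg el + 1) (0 : Int), List.replicate el.length (-1 : Int),
        List.replicate el.length (-1 : Int), 0)
      = (bpF el 0, ordF el 0, npF el 0, (flatN el 0).length) := by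
    unfold bpF ordF npF flatN
    rw [replicate_eq_map_range, replicate_eq_map_range, replicate_eq_map_range]
    simp
  rw [hsplit, outer_append (mdeg el) _ _ 0 _ (by rw [hlen1]; omega), hinit,
    outer_spec el (mdeg el + 1) 0 (by omega),
    outer_stop (mdeg el) (0 + ((List.range' 0 (mdeg el + 1)).map (bkt el)).length) _ _
      (by rw [hlen1]; omega)]

theorem sideB (el : List (List Int)) (hel : el ≠ []) (hPre : Pre_sort_by_degree el) :
    sort_by_degree_alt el
      = (ordF el (mdeg el + 1), (dSeq el).map (fun k : Nat => (k : Int)),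
         bpF el (mdeg el + 1), npF el (mdeg el + 1)) := by
  have hMn : mdeg el < el.length := mdeg_lt el hel hPre
  have hdgs : el.map (fun adj => ((adj.length : Nat) : Int))
      = (dSeq el).map (fun k : Nat => (k : Int)) := by
    unfold dSeq
    rw [List.map_map]
    rfl
  have hmax : (PySem.List.max? (el.map (fun adj => ((adj.length : Nat) : Int)))
        (fun x => x)).getD 0 = ((mdeg el : Nat) : Int) := by
    cases el with
    | nil => exact absurd rfl hel
    | cons a t =>
      rw [List.map_cons, PySem.List.max?_id_cons, Option.getD_some]
      have h1 : t.map (fun adj => ((adj.length : Nat) : Int))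
          = (t.map List.length).map (fun k : Nat => (k : Int)) := by
        rw [List.map_map]; rfl
      rw [h1, castfold_max (t.map List.length) a.length]
      unfold mdeg dSeq
      rw [List.map_cons, List.foldl_cons, Nat.zero_max]
  have hn' : (el.map (fun adj => ((adj.length : Nat) : Int))).length = el.length :=
    List.length_map ..
  have hgetd : ∀ i, (el.map (fun adj => ((adj.length : Nat) : Int))).getD i 0
      = (((dSeq el).getD i 0 : Nat) : Int) := by
    intro i
    rw [hdgs]
    exact List.getD_map (dSeq el) 0 (fun k : Nat => (k : Int))
  have hbuckets : (PySem.List.pyRange 0 ((el.length : Nat) : Int) 1).map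
        (fun d => (PySem.List.enumerate (el.map (fun adj => ((adj.length : Nat) : Int))) 0).filterMap
          (fun p => if p.2 = d then some p.1 else none))
      = (List.range el.length).map
          (fun e => (bkt el e).map (fun k : Nat => (k : Int))) := by
    rw [PySem.List.pyRange_zero_natCast, List.map_map]
    apply List.map_congr_left
    intro e _
    show (PySem.List.enumerate (el.map (fun adj => ((adj.length : Nat) : Int))) 0).filterMap
        (fun p => if p.2 = ((e : Nat) : Int) then some p.1 else none)
      = (bkt el e).map (fun k : Nat => (k : Int))
    rw [PySem.List.enumerate_eq_map_pyRange _ 0, PySem.List.len_eq, hn',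
      PySem.List.pyRange_zero_natCast, List.map_map, List.filterMap_map]
    rw [List.filterMap_congr (g := fun i : Nat =>
        if decide ((dSeq el).getD i 0 = e) = true then some ((i : Nat) : Int) else none)
      (by
        intro i _
        show (if PySem.List.pyGetD (el.map (fun adj => ((adj.length : Nat) : Int))) ((i : Nat) : Int) 0
              = ((e : Nat) : Int) then some ((i : Nat) : Int) else none) = _
        rw [PySem.List.pyGetD_natCast, hgetd i]
        by_cases h : (dSeq el).getD i 0 = e
        · rw [if_pos (by exact_mod_cast h)]
          exact (if_pos (decide_eq_true h)).symm
        · rw [if_neg (by exact_mod_cast h)]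
          exact (if_neg (by simp only [decide_eq_true_eq]; exact h)).symm)]
    rw [filterMap_if_eq_filter_map]
    rfl
  have horder : ((List.range el.length).map
        (fun e => (bkt el e).map (fun k : Nat => (k : Int)))).flatten
      = (flatN el (mdeg el + 1)).map (fun k : Nat => (k : Int)) := by
    rw [← flatN_stable el el.length (by omega)]
    unfold flatN
    rw [List.map_flatten, List.map_map]
    rfl
  have hbp : (PySem.List.pyRange 0 (((mdeg el : Nat) : Int) + 1) 1).map
        (fun d => ((PySem.List.slice ((List.range el.length).map
            (fun e => (bkt el e).map (fun k : Nat => (k : Int)))) none (some d)).map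
          (fun b => (b.length : Int))).sum)
      = bpF el (mdeg el + 1) := by
    rw [show (((mdeg el : Nat) : Int) + 1) = (((mdeg el + 1 : Nat) : Nat) : Int) by push_cast; ring,
      PySem.List.pyRange_zero_natCast, List.map_map]
    unfold bpF
    apply List.map_congr_left
    intro e he
    have he' : e < mdeg el + 1 := List.mem_range.mp he
    show ((PySem.List.slice ((List.range el.length).map
        (fun e => (bkt el e).map (fun k : Nat => (k : Int)))) none (some ((e : Nat) : Int))).map
        (fun b : List Int => (b.length : Int))).sum = _
    rw [PySem.List.slice_to_natCast, ← List.map_take, List.take_range,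
      Nat.min_eq_left (by omega : e ≤ el.length), List.map_map]
    rw [if_pos he']
    have hmapeq : (List.range e).map ((fun b : List Int => (b.length : Int))
          ∘ (fun d => (bkt el d).map (fun k : Nat => (k : Int))))
        = (List.range e).map (fun d => (((bkt el d).length : Nat) : Int)) := by
      apply List.map_congr_left
      intro d _
      show (((bkt el d).map (fun k : Nat => (k : Int))).length : Int) = _
      rw [List.length_map]
    have hcomp : (List.range e).map (fun d => (((bkt el d).length : Nat) : Int))
        = ((List.range e).map (fun d => (bkt el d).length)).map (fun k : Nat => (k : Int)) := by
      rw [List.map_map]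
      rfl
    have hflat : (flatN el e).length = ((List.range e).map (fun d => (bkt el d).length)).sum := by
      unfold flatN
      rw [List.length_flatten, List.map_map]
      rfl
    rw [hmapeq, hcomp, ← Nat.cast_list_sum, hflat]
  have hnp : (PySem.List.pyRange 0 ((el.length : Nat) : Int) 1).map
        (fun v => (((PySem.List.index? ((flatN el (mdeg el + 1)).map (fun k : Nat => (k : Int))) v).getD 0 : Nat) : Int))
      = npF el (mdeg el + 1) := by
    rw [PySem.List.pyRange_zero_natCast, List.map_map]
    unfold npF
    apply List.map_congr_left
    intro w hw
    have hwn : w < el.length := List.mem_range.mp hw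
    show ((((PySem.List.index? ((flatN el (mdeg el + 1)).map (fun k : Nat => (k : Int))) ((w : Nat) : Int)).getD 0 : Nat)) : Int) = _
    rw [index?_map_natCast, index?_flatN_full el w hwn, Option.getD_some,
      if_pos (by have := deg_le_mdeg el w hwn; omega)]
  unfold sort_by_degree_alt
  dsimp only
  rw [hmax, hbuckets, horder, hbp, hnp, hdgs]
  unfold ordF
  rw [length_flatN_full, Nat.sub_self, List.replicate_zero, List.append_nil]

-- ===== VERDICT (by name: the statement is the Claim_ definition above) =====
theorem sort_by_degree_spec : Claim_equal_sort_by_degree := by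
  intro el _ hPre
  unfold Spec_sort_by_degree
  by_cases hel : el = []
  · subst hel; decide
  · rw [sideA el hel hPre, sideB el hel hPre]
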